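-- pv_equiv track=rewrite | github.com/raold/second-brain | scripts/fix_all_route_imports.py | find_import_section_end
-- ===== SOURCE A (Python) =====
-- def find_import_section_end(content: str) -> int:
--     """Find the end of the import section in a Python file"""
--     lines = content.split('\n')
--     import_end = 0
--
--     for i, line in enumerate(lines):
--         stripped = line.strip()
--         if stripped.startswith(('import ', 'from ')) or stripped.startswith('#') or stripped == '':
--             import_end = i + 1
--         elif stripped.startswith('"""') or stripped.startswith("'''"):
--             # Handle docstrings
--             import_end = i + 1
--         else:
--             break
--
--     # Convert back to character position
--     return len('\n'.join(lines[:import_end])) + (1 if import_end > 0 else 0)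
-- ===== SOURCE B (Python) =====
-- def _is_header_line(stripped: str) -> bool:
--     return stripped == '' or stripped.startswith(
--         ('import ', 'from ', '#', '"""', "'''"))
--
--
-- def find_import_section_end(content: str) -> int:
--     """Find the end of the import section in a Python file"""
--     pos = 0
--     for line in content.split('\n'):
--         if _is_header_line(line.strip()):
--             pos += len(line) + 1
--         else:
--             break
--     return pos
-- ===== Notes on version B (the rewrite author's own statement) =====
-- stated objective: simpler
-- what changed: B accumulates the character offset directly in one pass (pos += len(line)+1 per header line) instead of first computing a line index import_end and then re-joining lines[:import_end] in a second O(n) pass; the index, the slice and the join disappear.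
import Mathlib
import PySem

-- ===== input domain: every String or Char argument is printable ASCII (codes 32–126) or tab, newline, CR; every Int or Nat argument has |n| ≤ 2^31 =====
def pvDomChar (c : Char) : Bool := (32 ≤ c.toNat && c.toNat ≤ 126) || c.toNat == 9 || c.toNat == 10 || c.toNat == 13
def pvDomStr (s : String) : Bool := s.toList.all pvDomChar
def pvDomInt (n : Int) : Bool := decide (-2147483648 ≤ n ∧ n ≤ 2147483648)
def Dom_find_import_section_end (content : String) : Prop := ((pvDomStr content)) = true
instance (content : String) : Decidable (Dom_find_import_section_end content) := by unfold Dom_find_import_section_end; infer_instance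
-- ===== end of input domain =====

-- B computes the character offset in a single accumulating pass (pos += len(line)+1 per
-- header line) instead of A's line-index loop followed by a join of lines[:import_end]: simpler.


-- ===== PORT A =====
-- the loop: import_end starts at 0; on each matching line import_end := i + 1, else break
def pvLoopA : List String → Int → Int → Int
  | [], _, acc => acc
  | line :: rest, i, acc =>
    let stripped := PySem.Str.strip line
    if PySem.Str.startswith stripped "import " || PySem.Str.startswith stripped "from "
        || PySem.Str.startswith stripped "#" || stripped == "" then
      pvLoopA rest (i + 1) (i + 1)
    else if PySem.Str.startswith stripped "\"\"\"" || PySem.Str.startswith stripped "'''" then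
      -- Handle docstrings
      pvLoopA rest (i + 1) (i + 1)
    else acc

def find_import_section_end (content : String) : Int :=
  let lines := (PySem.Str.split? content "\n").getD []   -- sep "\n" ≠ "": split? is always some
  let import_end := pvLoopA lines 0 0
  PySem.Str.len (PySem.Str.join "\n" (PySem.List.slice lines none (some import_end))) +
    (if import_end > 0 then 1 else 0)

-- ===== PORT B =====
def pvIsHeaderLine (stripped : String) : Bool :=
  stripped == "" || PySem.Str.startswith stripped "import "
    || PySem.Str.startswith stripped "from " || PySem.Str.startswith stripped "#"
    || PySem.Str.startswith stripped "\"\"\"" || PySem.Str.startswith stripped "'''"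

def pvLoopB : List String → Int → Int
  | [], pos => pos
  | line :: rest, pos =>
    if pvIsHeaderLine (PySem.Str.strip line) then
      pvLoopB rest (pos + PySem.Str.len line + 1)
    else pos

def find_import_section_end_alt (content : String) : Int :=
  pvLoopB ((PySem.Str.split? content "\n").getD []) 0

-- ===== PRECONDITION & SPEC =====
def Spec_find_import_section_end (content : String) (out : Int) : Prop := out = find_import_section_end_alt content
instance (content : String) (out : Int) : Decidable (Spec_find_import_section_end content out) := by unfold Spec_find_import_section_end; infer_instance

-- ===== CLAIM (what is proved, stated in full; the proofs are below) =====
def Claim_equal_find_import_section_end : Prop := ∀ (content : String), Dom_find_import_section_end content → Spec_find_import_section_end content (find_import_section_end content)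

-- ===== LEMMAS AND PROOFS =====

-- number of leading header lines (A's final import_end)
def pvCnt : List String → Nat
  | [] => 0
  | l :: r => if pvIsHeaderLine (PySem.Str.strip l) then pvCnt r + 1 else 0

-- B's accumulated total
def pvG : List String → Int
  | [] => 0
  | l :: r => if pvIsHeaderLine (PySem.Str.strip l) then PySem.Str.len l + 1 + pvG r else 0

lemma pvOk_merge (s : String) :
    pvIsHeaderLine s =
      ((PySem.Str.startswith s "import " || PySem.Str.startswith s "from "
        || PySem.Str.startswith s "#" || s == "")
       || (PySem.Str.startswith s "\"\"\"" || PySem.Str.startswith s "'''")) := by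
  simp [pvIsHeaderLine, Bool.or_comm, Bool.or_assoc, Bool.or_left_comm]

lemma pvCnt_le_length (r : List String) : pvCnt r ≤ r.length := by
  induction r with
  | nil => simp [pvCnt]
  | cons a b ihb =>
    simp only [pvCnt, List.length_cons]
    split <;> omega

lemma pvLoopA_eq (lines : List String) : ∀ i : Int, pvLoopA lines i i = i + (pvCnt lines : Int) := by
  induction lines with
  | nil => intro i; simp [pvLoopA, pvCnt]
  | cons l r ih =>
    intro i
    simp only [pvLoopA, pvCnt, pvOk_merge]
    by_cases h1 : (PySem.Str.startswith (PySem.Str.strip l) "import "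
        || PySem.Str.startswith (PySem.Str.strip l) "from "
        || PySem.Str.startswith (PySem.Str.strip l) "#"
        || PySem.Str.strip l == "") = true
    · simp only [h1]
      simp [ih (i + 1)]; ring
    · by_cases h2 : (PySem.Str.startswith (PySem.Str.strip l) "\"\"\""
          || PySem.Str.startswith (PySem.Str.strip l) "'''") = true
      · simp only [Bool.not_eq_true] at h1
        simp only [h1, h2]
        simp [ih (i + 1)]; ring
      · simp only [Bool.not_eq_true] at h1 h2
        simp only [h1, h2]
        simp

lemma pvLoopB_eq (lines : List String) : ∀ p : Int, pvLoopB lines p = p + pvG lines := by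
  induction lines with
  | nil => intro p; simp [pvLoopB, pvG]
  | cons l r ih =>
    intro p
    by_cases h : pvIsHeaderLine (PySem.Str.strip l) = true
    · simp only [pvLoopB, pvG, h, if_true, ih]; ring
    · simp only [Bool.not_eq_true] at h
      simp [pvLoopB, pvG, h]

lemma pvG_zero_of_cnt_zero (lines : List String) (h : pvCnt lines = 0) : pvG lines = 0 := by
  cases lines with
  | nil => simp [pvG]
  | cons l r =>
    simp only [pvCnt] at h
    by_cases hl : pvIsHeaderLine (PySem.Str.strip l) = true
    · simp [hl] at h
    · simp only [Bool.not_eq_true] at hl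
      simp [pvG, hl]

lemma pvJoin_len_cons (l x : String) (xs : List String) :
    PySem.Str.len (PySem.Str.join "\n" (l :: x :: xs)) =
      PySem.Str.len l + 1 + PySem.Str.len (PySem.Str.join "\n" (x :: xs)) := by
  simp only [PySem.Str.len_eq, PySem.Str.toList_join, List.map_cons,
    PySem.Chars.join_cons_cons, List.length_append]
  have h1 : ("\n".toList).length = 1 := rfl
  rw [h1]
  push_cast
  ring

lemma pvJoin_len (lines : List String) :
    PySem.Str.len (PySem.Str.join "\n" (lines.take (pvCnt lines))) +
      (if (pvCnt lines : Int) > 0 then 1 else 0) = pvG lines := by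
  induction lines with
  | nil => simp [pvCnt, pvG, PySem.Str.len_eq, PySem.Str.toList_join, PySem.Chars.join_nil]
  | cons l r ih =>
    by_cases h : pvIsHeaderLine (PySem.Str.strip l) = true
    · simp only [pvCnt, pvG, h, if_true, List.take_succ_cons]
      rcases Nat.eq_zero_or_pos (pvCnt r) with hz | hp
      · rw [hz, pvG_zero_of_cnt_zero r hz]
        simp [PySem.Str.len_eq, PySem.Str.toList_join, PySem.Chars.join_singleton]
      · obtain ⟨x, xs, hx⟩ : ∃ x xs, r.take (pvCnt r) = x :: xs := by
          rcases hr : r.take (pvCnt r) with _ | ⟨x, xs⟩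
          · exfalso
            have hlt : (r.take (pvCnt r)).length = min (pvCnt r) r.length :=
              List.length_take ..
            have hlr := pvCnt_le_length r
            rw [hr] at hlt
            simp at hlt
            omega
          · exact ⟨x, xs, rfl⟩
        rw [hx, pvJoin_len_cons]
        rw [if_pos (by exact_mod_cast hp), hx] at ih
        rw [if_pos (by positivity)]
        omega
    · simp only [Bool.not_eq_true] at h
      simp only [pvCnt, pvG, h]
      simp [PySem.Str.len_eq, PySem.Str.toList_join, PySem.Chars.join_nil]

-- ===== VERDICT (by name: the statement is the Claim_ definition above) =====
theorem find_import_section_end_spec : Claim_equal_find_import_section_end := by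
  intro content _
  unfold Spec_find_import_section_end
  show find_import_section_end content = find_import_section_end_alt content
  simp only [find_import_section_end, find_import_section_end_alt]
  generalize (PySem.Str.split? content "\n").getD [] = lines
  rw [pvLoopA_eq lines 0, zero_add, pvLoopB_eq lines 0, zero_add,
    PySem.List.slice_to_natCast]
  exact pvJoin_len lines
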